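-- pv_equiv track=rewrite | github.com/Pneu-matic/SpriteSomething | util.py | load_virtual_VRAM
-- ===== SOURCE A (Python) =====
-- TILESIZE = 0x20
--
-- def convert_to_rom_address(snes_addr):
--     #convert from memory address to ROM address (lorom 0x80)
--     bank = snes_addr // 0x10000 - 0x80
--     offset = (snes_addr % 0x10000) - 0x8000
--
--     if offset < 0x0000 or bank < 0x00:
--         raise AssertionError(f"Function convert_to_rom_address() called on {hex(snes_addr)}, but this is not a valid SNES address.")
--
--     new_address = bank*0x8000 + offset
--
--     return new_address
--
-- def load_virtual_VRAM(upper_graphics_data,lower_graphics_data):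
--     [upper_graphics_ptr,upper_top_row_amt,upper_bottom_row_amt] = upper_graphics_data
--     [lower_graphics_ptr,lower_top_row_amt,lower_bottom_row_amt] = lower_graphics_data
--
--     VRAM = [None] * 0x20    #initialize
--
--     for i in range(upper_top_row_amt//TILESIZE):
--         VRAM[i] = convert_to_rom_address(upper_graphics_ptr + i * TILESIZE)
--
--     for i in range(lower_top_row_amt//TILESIZE):
--         VRAM[0x08 + i] = convert_to_rom_address(lower_graphics_ptr + i * TILESIZE)
--
--     for i in range(upper_bottom_row_amt//TILESIZE):
--         VRAM[0x10 + i] = convert_to_rom_address(upper_graphics_ptr + upper_top_row_amt + i * TILESIZE)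
--
--     for i in range(lower_bottom_row_amt//TILESIZE):
--         VRAM[0x18 + i] = convert_to_rom_address(lower_graphics_ptr + lower_top_row_amt + i * TILESIZE)
--
--     return VRAM
-- ===== SOURCE B (Python) =====
-- TILESIZE = 0x20
--
-- def convert_to_rom_address(snes_addr):
--     bank = snes_addr // 0x10000 - 0x80
--     offset = (snes_addr % 0x10000) - 0x8000
--     if offset < 0x0000 or bank < 0x00:
--         raise AssertionError(f"Function convert_to_rom_address() called on {hex(snes_addr)}, but this is not a valid SNES address.")
--     return bank * 0x8000 + offset
--
-- def load_virtual_VRAM(upper_graphics_data, lower_graphics_data):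
--     upper_ptr, upper_top, upper_bottom = upper_graphics_data
--     lower_ptr, lower_top, lower_bottom = lower_graphics_data
--
--     def slot(v):
--         # decide each VRAM slot directly, checking regions in reverse
--         # write order so the last writer wins
--         if 0x18 <= v < 0x18 + lower_bottom // TILESIZE:
--             return convert_to_rom_address(lower_ptr + lower_top + (v - 0x18) * TILESIZE)
--         if 0x10 <= v < 0x10 + upper_bottom // TILESIZE:
--             return convert_to_rom_address(upper_ptr + upper_top + (v - 0x10) * TILESIZE)
--         if 0x08 <= v < 0x08 + lower_top // TILESIZE:
--             return convert_to_rom_address(lower_ptr + (v - 0x08) * TILESIZE)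
--         if v < upper_top // TILESIZE:
--             return convert_to_rom_address(upper_ptr + v * TILESIZE)
--         return None
--
--     return [slot(v) for v in range(0x20)]
-- ===== Notes on version B (the rewrite author's own statement) =====
-- stated objective: alternative
-- what changed: A scatters: it mutates a [None]*32 list with four fill loops; B gathers: it builds the table in one comprehension over the 32 slots, computing each slot's value directly by classifying the slot into its region (checked in reverse write order so the last writer wins), with no mutation.
import Mathlib
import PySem

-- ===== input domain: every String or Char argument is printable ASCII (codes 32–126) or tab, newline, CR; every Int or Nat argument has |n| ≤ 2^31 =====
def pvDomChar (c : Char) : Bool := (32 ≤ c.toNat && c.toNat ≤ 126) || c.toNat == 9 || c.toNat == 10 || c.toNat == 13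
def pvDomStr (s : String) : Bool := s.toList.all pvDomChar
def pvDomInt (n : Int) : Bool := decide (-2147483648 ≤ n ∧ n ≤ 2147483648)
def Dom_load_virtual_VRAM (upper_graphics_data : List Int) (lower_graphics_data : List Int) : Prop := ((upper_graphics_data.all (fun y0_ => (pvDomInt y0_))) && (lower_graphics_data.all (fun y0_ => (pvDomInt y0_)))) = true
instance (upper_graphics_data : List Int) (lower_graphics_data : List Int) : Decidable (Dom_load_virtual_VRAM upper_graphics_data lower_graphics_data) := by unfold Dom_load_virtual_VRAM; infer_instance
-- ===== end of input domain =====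

-- A scatters (mutates [None]*32 via four fill loops); B gathers (one comprehension over
-- the 32 slots, classifying each slot into its region in reverse write order). Objective:
-- alternative, no mutation.

-- ===== PORT A =====
-- convert_to_rom_address: returns none exactly where the Python raises AssertionError
-- (excluded by Pre_); otherwise some of the computed ROM address.
def convert_to_rom_address (snes_addr : Int) : Option Int :=
  let bank := PySem.Int.floordiv snes_addr 0x10000 - 0x80
  let offset := PySem.Int.mod snes_addr 0x10000 - 0x8000
  if offset < 0 ∨ bank < 0 then none
  else some (bank * 0x8000 + offset)

-- A: four explicit fill loops. `range(n // TILESIZE)` is List.range of the toNat of the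
-- floor division (empty for negative n, as in Python); VRAM[k] = x is List.set (in range
-- under Pre_; outside Pre_ nothing is claimed).
def load_virtual_VRAM (upper_graphics_data : List Int) (lower_graphics_data : List Int) : List (Option Int) :=
  match upper_graphics_data, lower_graphics_data with
  | [up, ut, ub], [lp, lt, lb] =>
    let V := List.replicate 0x20 (none : Option Int)
    let V := (List.range (PySem.Int.floordiv ut 0x20).toNat).foldl
      (fun V i => V.set i (convert_to_rom_address (up + (i : Int) * 0x20))) V
    let V := (List.range (PySem.Int.floordiv lt 0x20).toNat).foldl
      (fun V i => V.set (0x08 + i) (convert_to_rom_address (lp + (i : Int) * 0x20))) V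
    let V := (List.range (PySem.Int.floordiv ub 0x20).toNat).foldl
      (fun V i => V.set (0x10 + i) (convert_to_rom_address (up + ut + (i : Int) * 0x20))) V
    let V := (List.range (PySem.Int.floordiv lb 0x20).toNat).foldl
      (fun V i => V.set (0x18 + i) (convert_to_rom_address (lp + lt + (i : Int) * 0x20))) V
    V
  | _, _ => []

-- ===== PORT B =====
-- B's copy of convert_to_rom_address (kept separate so the ports share no code)
def rom_address_b (snes_addr : Int) : Option Int :=
  let bank := PySem.Int.floordiv snes_addr 0x10000 - 0x80
  let offset := PySem.Int.mod snes_addr 0x10000 - 0x8000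
  if offset < 0 ∨ bank < 0 then none
  else some (bank * 0x8000 + offset)

-- the per-slot classifier: regions checked in reverse write order (last writer wins)
def slot_b (up ut ub lp lt lb : Int) (v : Nat) : Option Int :=
  if 0x18 ≤ v ∧ (v : Int) < 0x18 + PySem.Int.floordiv lb 0x20 then
    rom_address_b (lp + lt + ((v : Int) - 0x18) * 0x20)
  else if 0x10 ≤ v ∧ (v : Int) < 0x10 + PySem.Int.floordiv ub 0x20 then
    rom_address_b (up + ut + ((v : Int) - 0x10) * 0x20)
  else if 0x08 ≤ v ∧ (v : Int) < 0x08 + PySem.Int.floordiv lt 0x20 then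
    rom_address_b (lp + ((v : Int) - 0x08) * 0x20)
  else if (v : Int) < PySem.Int.floordiv ut 0x20 then
    rom_address_b (up + (v : Int) * 0x20)
  else none

-- tuple unpacking rendered as a length test + positional reads
def load_virtual_VRAM_alt (upper_graphics_data : List Int) (lower_graphics_data : List Int) : List (Option Int) :=
  if upper_graphics_data.length = 3 ∧ lower_graphics_data.length = 3 then
    (List.range 0x20).map
      (slot_b (upper_graphics_data.getD 0 0) (upper_graphics_data.getD 1 0) (upper_graphics_data.getD 2 0)
              (lower_graphics_data.getD 0 0) (lower_graphics_data.getD 1 0) (lower_graphics_data.getD 2 0))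
  else []

-- ===== PRECONDITION & SPEC =====
-- snes_addr is a valid lorom 0x80 address (convert_to_rom_address does not raise)
def pvValidSnes (snes_addr : Int) : Prop :=
  0 ≤ PySem.Int.mod snes_addr 0x10000 - 0x8000 ∧ 0 ≤ PySem.Int.floordiv snes_addr 0x10000 - 0x80

-- Pre_: exactly the inputs on which the Python A returns normally: both lists unpack into
-- three values, every written VRAM index is < 0x20 (no IndexError), and every address
-- passed to convert_to_rom_address is valid (no AssertionError).
def Pre_load_virtual_VRAM (upper_graphics_data : List Int) (lower_graphics_data : List Int) : Prop :=
  upper_graphics_data.length = 3 ∧ lower_graphics_data.length = 3 ∧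
  (let up := upper_graphics_data.getD 0 0
   let ut := upper_graphics_data.getD 1 0
   let ub := upper_graphics_data.getD 2 0
   let lp := lower_graphics_data.getD 0 0
   let lt := lower_graphics_data.getD 1 0
   let lb := lower_graphics_data.getD 2 0
   (∀ i ∈ List.range (PySem.Int.floordiv ut 0x20).toNat, i < 0x20 ∧ pvValidSnes (up + (i : Int) * 0x20)) ∧
   (∀ i ∈ List.range (PySem.Int.floordiv lt 0x20).toNat, i < 0x18 ∧ pvValidSnes (lp + (i : Int) * 0x20)) ∧
   (∀ i ∈ List.range (PySem.Int.floordiv ub 0x20).toNat, i < 0x10 ∧ pvValidSnes (up + ut + (i : Int) * 0x20)) ∧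
   (∀ i ∈ List.range (PySem.Int.floordiv lb 0x20).toNat, i < 0x08 ∧ pvValidSnes (lp + lt + (i : Int) * 0x20)))

instance (upper_graphics_data : List Int) (lower_graphics_data : List Int) : Decidable (Pre_load_virtual_VRAM upper_graphics_data lower_graphics_data) := by
  unfold Pre_load_virtual_VRAM pvValidSnes; infer_instance

def pvWitness_load_virtual_VRAM : List Int × List Int :=
  ([0x808000, 0x40, 0x40], [0x818000, 0x20, 0x20])

def Spec_load_virtual_VRAM (upper_graphics_data : List Int) (lower_graphics_data : List Int) (out : List (Option Int)) : Prop := out = load_virtual_VRAM_alt upper_graphics_data lower_graphics_data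
instance (upper_graphics_data : List Int) (lower_graphics_data : List Int) (out : List (Option Int)) : Decidable (Spec_load_virtual_VRAM upper_graphics_data lower_graphics_data out) := by unfold Spec_load_virtual_VRAM; infer_instance

-- ===== CLAIM (what is proved, stated in full; the proofs are below) =====
def Claim_equal_load_virtual_VRAM : Prop := ∀ (upper_graphics_data : List Int) (lower_graphics_data : List Int), Dom_load_virtual_VRAM upper_graphics_data lower_graphics_data → Pre_load_virtual_VRAM upper_graphics_data lower_graphics_data → Spec_load_virtual_VRAM upper_graphics_data lower_graphics_data (load_virtual_VRAM upper_graphics_data lower_graphics_data)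

-- ===== LEMMAS AND PROOFS =====

-- a fill loop preserves the list's length
theorem foldl_set_length (g : Nat → Option Int) (base n : Nat) (V : List (Option Int)) :
    ((List.range n).foldl (fun W i => W.set (base + i) (g i)) V).length = V.length := by
  induction n with
  | zero => simp
  | succ n ih => rw [List.range_succ, List.foldl_append]; simp [ih]

-- pointwise characterisation of a fill loop: inside [base, base+n) the loop's value,
-- outside the previous value (needs j in range of the list)
theorem foldl_set_get (g : Nat → Option Int) (base : Nat) :
    ∀ (n j : Nat) (V : List (Option Int)), j < V.length →
    ((List.range n).foldl (fun W i => W.set (base + i) (g i)) V)[j]? =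
      if base ≤ j ∧ j < base + n then some (g (j - base)) else V[j]? := by
  intro n
  induction n with
  | zero =>
    intro j V _
    simp only [List.range_zero, List.foldl_nil]
    rw [if_neg]; omega
  | succ n ih =>
    intro j V hj
    rw [List.range_succ, List.foldl_append, List.foldl_cons, List.foldl_nil,
        List.getElem?_set, foldl_set_length, ih j V hj]
    by_cases he : base + n = j
    · subst he
      rw [if_pos rfl, if_pos hj, if_pos (by omega), Nat.add_sub_cancel_left]
    · rw [if_neg he]
      by_cases h1 : base ≤ j ∧ j < base + n
      · rw [if_pos h1, if_pos (by omega)]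
      · rw [if_neg h1, if_neg (by omega)]

-- the two ports agree on every input (even outside Pre_)
theorem ports_eq (u l : List Int) : load_virtual_VRAM u l = load_virtual_VRAM_alt u l := by
  rcases u with _ | ⟨up, _ | ⟨ut, _ | ⟨ub, _ | ⟨x, us⟩⟩⟩⟩ <;>
    rcases l with _ | ⟨lp, _ | ⟨lt, _ | ⟨lb, _ | ⟨y, ls⟩⟩⟩⟩ <;>
    simp only [load_virtual_VRAM, load_virtual_VRAM_alt, List.length_nil, List.length_cons]
  all_goals try rw [if_neg (by omega)]
  -- main case: both lists of length 3
  rw [if_pos (by simp)]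
  simp only [List.getD, List.getElem?_cons_zero, List.getElem?_cons_succ, Option.getD_some]
  -- abbreviations for the four loop counts
  set a := (PySem.Int.floordiv ut 0x20).toNat with ha
  set b := (PySem.Int.floordiv lt 0x20).toNat with hb
  set c := (PySem.Int.floordiv ub 0x20).toNat with hc
  set d := (PySem.Int.floordiv lb 0x20).toNat with hd
  -- write the first loop's update with an explicit base 0 so the fill-loop lemmas apply
  have e1 : (fun (V : List (Option Int)) i => V.set i (convert_to_rom_address (up + (i : Int) * 0x20)))
      = (fun V i => V.set (0 + i) (convert_to_rom_address (up + (i : Int) * 0x20))) := by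
    funext V i; rw [Nat.zero_add]
  rw [e1]
  apply List.ext_getElem?
  intro j
  by_cases hj : j < 0x20
  · -- rewrite A's side loop by loop, outermost first
    rw [foldl_set_get _ 0x18 d j _ (by
      rw [foldl_set_length, foldl_set_length, foldl_set_length]; simpa using hj)]
    rw [foldl_set_get _ 0x10 c j _ (by
      rw [foldl_set_length, foldl_set_length]; simpa using hj)]
    rw [foldl_set_get _ 0x08 b j _ (by
      rw [foldl_set_length]; simpa using hj)]
    rw [foldl_set_get _ 0 a j _ (by simpa using hj)]
    rw [List.getElem?_replicate, if_pos hj]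
    -- B's side: slot j
    rw [List.getElem?_map, List.getElem?_range hj]
    simp only [Option.map_some, slot_b]
    -- align the Nat-count conditions of A with the Int conditions of B
    have hA4 : (0x18 ≤ j ∧ j < 0x18 + d) ↔ (0x18 ≤ j ∧ (j : Int) < 0x18 + PySem.Int.floordiv lb 0x20) := by omega
    have hA3 : (0x10 ≤ j ∧ j < 0x10 + c) ↔ (0x10 ≤ j ∧ (j : Int) < 0x10 + PySem.Int.floordiv ub 0x20) := by omega
    have hA2 : (0x08 ≤ j ∧ j < 0x08 + b) ↔ (0x08 ≤ j ∧ (j : Int) < 0x08 + PySem.Int.floordiv lt 0x20) := by omega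
    have hA1 : (0 ≤ j ∧ j < 0 + a) ↔ ((j : Int) < PySem.Int.floordiv ut 0x20) := by omega
    simp only [hA4, hA3, hA2, hA1]
    split_ifs with g4 g3 g2 g1
    · have : ((j - 0x18 : Nat) : Int) = (j : Int) - 0x18 := by omega
      rw [this]; rfl
    · have : ((j - 0x10 : Nat) : Int) = (j : Int) - 0x10 := by omega
      rw [this]; rfl
    · have : ((j - 0x08 : Nat) : Int) = (j : Int) - 0x08 := by omega
      rw [this]; rfl
    · have : ((j - 0 : Nat) : Int) = (j : Int) := by omega
      rw [this]; rfl
    · rfl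
  · -- j out of range: both sides none
    rw [List.getElem?_eq_none (by
        rw [foldl_set_length, foldl_set_length, foldl_set_length, foldl_set_length]
        simp; omega),
      List.getElem?_eq_none (by simp; omega)]

-- ===== VERDICT (by name: the statement is the Claim_ definition above) =====
theorem load_virtual_VRAM_spec : Claim_equal_load_virtual_VRAM := by
  intro u l _ _
  unfold Spec_load_virtual_VRAM
  exact ports_eq u l
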